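-- pv_equiv track=rewrite | github.com/NRLBM/assembly | workflow/scripts/bexsero_coverage.py | process_NHBA
-- ===== SOURCE A (Python) =====
-- def process_NHBA(typing_result, results_dict, scheme_dict):
--   if 'NHBA_peptide' not in typing_result:
--     results_dict['NHBA_peptide', 'BAST'] = 'missing/novel allele'
--     results_dict['NHBA_peptide', 'gMATS'] = 'missing/novel allele'
--     results_dict['NHBA_peptide', 'alleles'] = '-'
--   else:
--     typing_list = typing_result['NHBA_peptide']
--     covered_gMATS = sum([x['allele_id'] in scheme_dict['gMATS_NHBA_peptide_covered'] for x in typing_list]) > 0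
--     uncovered_gMATS = sum([x['allele_id'] in scheme_dict['gMATS_NHBA_peptide_uncovered'] for x in typing_list]) > 0
--     if covered_gMATS:
--       results_dict['NHBA_peptide', 'gMATS'] = 'covered'
--     elif uncovered_gMATS:
--       results_dict['NHBA_peptide', 'gMATS'] = 'uncovered'
--     else:
--       results_dict['NHBA_peptide', 'gMATS'] = 'unpredictable'
--     exact_match_BAST = sum([x['allele_id'] in scheme_dict['BAST_NHBA_peptide_exact_match'] for x in typing_list]) > 0
--     cross_reactive_BAST = sum([x['allele_id'] in scheme_dict['BAST_NHBA_peptide_cross_reactive'] for x in typing_list]) > 0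
--     none_result_BAST = sum([x['allele_id'] in scheme_dict['BAST_NHBA_peptide_none'] for x in typing_list]) > 0
--     if exact_match_BAST:
--       results_dict['NHBA_peptide', 'BAST'] = 'exact_match'
--     elif cross_reactive_BAST:
--       results_dict['NHBA_peptide', 'BAST'] = 'cross-reactive'
--     elif none_result_BAST:
--       results_dict['NHBA_peptide', 'BAST'] = 'none'
--     else:
--       results_dict['NHBA_peptide', 'BAST'] = 'insufficient data'
--     results_dict['NHBA_peptide', 'alleles'] = '|'.join([x['allele_id'] for x in typing_list])
--   return results_dict
-- ===== SOURCE B (Python) =====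
-- def process_NHBA(typing_result, results_dict, scheme_dict):
--   if 'NHBA_peptide' not in typing_result:
--     results_dict['NHBA_peptide', 'BAST'] = 'missing/novel allele'
--     results_dict['NHBA_peptide', 'gMATS'] = 'missing/novel allele'
--     results_dict['NHBA_peptide', 'alleles'] = '-'
--     return results_dict
--   G_KEYS = ('gMATS_NHBA_peptide_covered', 'gMATS_NHBA_peptide_uncovered')
--   B_KEYS = ('BAST_NHBA_peptide_exact_match', 'BAST_NHBA_peptide_cross_reactive',
--             'BAST_NHBA_peptide_none')
--   G_LABELS = ('covered', 'uncovered', 'unpredictable')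
--   B_LABELS = ('exact_match', 'cross-reactive', 'none', 'insufficient data')
--   ids, g, b = [], 2, 3
--   for x in typing_result['NHBA_peptide']:
--     a = x['allele_id']
--     ids.append(a)
--     for i, k in enumerate(G_KEYS):
--       if a in scheme_dict[k]:
--         g = min(g, i)
--     for i, k in enumerate(B_KEYS):
--       if a in scheme_dict[k]:
--         b = min(b, i)
--   results_dict['NHBA_peptide', 'gMATS'] = G_LABELS[g]
--   results_dict['NHBA_peptide', 'BAST'] = B_LABELS[b]
--   results_dict['NHBA_peptide', 'alleles'] = '|'.join(ids)
--   return results_dict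
-- ===== Notes on version B (the rewrite author's own statement) =====
-- stated objective: alternative
-- what changed: B makes a single fused pass over the typing entries maintaining minimum-rank accumulators (g,b) per category table and indexes label tuples at the end, instead of A's five separate indicator-sum scans of typing_list feeding hard-coded if/elif ladders.
import Mathlib
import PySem

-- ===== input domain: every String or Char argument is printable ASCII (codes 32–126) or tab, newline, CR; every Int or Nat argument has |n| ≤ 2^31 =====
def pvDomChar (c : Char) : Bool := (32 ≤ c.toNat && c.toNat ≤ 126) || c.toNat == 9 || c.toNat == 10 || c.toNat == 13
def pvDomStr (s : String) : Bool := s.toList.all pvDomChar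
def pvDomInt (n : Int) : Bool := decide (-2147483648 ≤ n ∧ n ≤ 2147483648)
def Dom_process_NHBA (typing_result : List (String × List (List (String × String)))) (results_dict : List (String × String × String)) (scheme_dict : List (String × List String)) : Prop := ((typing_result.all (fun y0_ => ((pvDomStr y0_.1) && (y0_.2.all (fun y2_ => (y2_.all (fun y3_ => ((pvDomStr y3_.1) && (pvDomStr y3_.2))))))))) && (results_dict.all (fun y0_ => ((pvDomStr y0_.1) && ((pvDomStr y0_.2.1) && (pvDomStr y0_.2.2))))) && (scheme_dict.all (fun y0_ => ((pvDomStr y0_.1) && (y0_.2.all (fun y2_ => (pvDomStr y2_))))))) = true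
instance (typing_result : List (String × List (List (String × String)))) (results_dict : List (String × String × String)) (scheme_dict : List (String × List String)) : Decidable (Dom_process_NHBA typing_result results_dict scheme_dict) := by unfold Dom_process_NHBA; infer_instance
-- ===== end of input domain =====

-- B replaces A's five indicator-sum scans and if/elif ladders by one fused pass over the
-- typing entries keeping minimum-rank accumulators indexed into label tables (objective:
-- alternative). A mutates results_dict in place in Python; equivalence here is about the
-- returned association list.


-- Shared dict semantics for results_dict (key = the leading String pair):
-- 'results_dict[k1,k2] = v' overwrites the first entry with that key in place, else appends.
def rdInsert (d : List (String × String × String)) (k1 k2 v : String) : List (String × String × String) :=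
  match d with
  | [] => [(k1, k2, v)]
  | (a, b, c) :: rest =>
    if a = k1 ∧ b = k2 then (k1, k2, v) :: rest else (a, b, c) :: rdInsert rest k1 k2 v

-- first-match assoc-list lookups (Python dict lookup); default used only outside Pre_
def trGet (d : List (String × List (List (String × String)))) (k : String) : List (List (String × String)) :=
  ((d.find? (fun p => p.1 == k)).map (·.2)).getD []
def sdGet (d : List (String × List String)) (k : String) : List String :=
  ((d.find? (fun p => p.1 == k)).map (·.2)).getD []
def xGet (x : List (String × String)) (k : String) : String :=
  ((x.find? (fun p => p.1 == k)).map (·.2)).getD ""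

-- ===== PORT A =====
def process_NHBA (typing_result : List (String × List (List (String × String)))) (results_dict : List (String × String × String)) (scheme_dict : List (String × List String)) : List (String × String × String) :=
  if ¬ ((typing_result.map (·.1)).contains "NHBA_peptide" = true) then
    let rd := rdInsert results_dict "NHBA_peptide" "BAST" "missing/novel allele"
    let rd := rdInsert rd "NHBA_peptide" "gMATS" "missing/novel allele"
    rdInsert rd "NHBA_peptide" "alleles" "-"
  else
    let typing_list := trGet typing_result "NHBA_peptide"
    let covered_gMATS := decide (0 < ((typing_list.map (fun x => if (sdGet scheme_dict "gMATS_NHBA_peptide_covered").contains (xGet x "allele_id") then (1:Int) else 0)).sum))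
    let uncovered_gMATS := decide (0 < ((typing_list.map (fun x => if (sdGet scheme_dict "gMATS_NHBA_peptide_uncovered").contains (xGet x "allele_id") then (1:Int) else 0)).sum))
    let rd := if covered_gMATS then rdInsert results_dict "NHBA_peptide" "gMATS" "covered"
      else if uncovered_gMATS then rdInsert results_dict "NHBA_peptide" "gMATS" "uncovered"
      else rdInsert results_dict "NHBA_peptide" "gMATS" "unpredictable"
    let exact_match_BAST := decide (0 < ((typing_list.map (fun x => if (sdGet scheme_dict "BAST_NHBA_peptide_exact_match").contains (xGet x "allele_id") then (1:Int) else 0)).sum))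
    let cross_reactive_BAST := decide (0 < ((typing_list.map (fun x => if (sdGet scheme_dict "BAST_NHBA_peptide_cross_reactive").contains (xGet x "allele_id") then (1:Int) else 0)).sum))
    let none_result_BAST := decide (0 < ((typing_list.map (fun x => if (sdGet scheme_dict "BAST_NHBA_peptide_none").contains (xGet x "allele_id") then (1:Int) else 0)).sum))
    let rd := if exact_match_BAST then rdInsert rd "NHBA_peptide" "BAST" "exact_match"
      else if cross_reactive_BAST then rdInsert rd "NHBA_peptide" "BAST" "cross-reactive"
      else if none_result_BAST then rdInsert rd "NHBA_peptide" "BAST" "none"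
      else rdInsert rd "NHBA_peptide" "BAST" "insufficient data"
    rdInsert rd "NHBA_peptide" "alleles" (PySem.Str.join "|" (typing_list.map (fun x => xGet x "allele_id")))

-- ===== PORT B =====
-- per-entry rank update: for i,k in enumerate(keys): if a in scheme_dict[k]: g = min(g, i)
-- (enumerate ported as an explicit index argument, starting at 0)
def updRank (scheme_dict : List (String × List String)) (keys : List String) (a : String) (i g : Nat) : Nat :=
  match keys with
  | [] => g
  | k :: rest => updRank scheme_dict rest a (i + 1) (if (sdGet scheme_dict k).contains a then min g i else g)

def process_NHBA_alt (typing_result : List (String × List (List (String × String)))) (results_dict : List (String × String × String)) (scheme_dict : List (String × List String)) : List (String × String × String) :=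
  if ¬ ((typing_result.map (·.1)).contains "NHBA_peptide" = true) then
    rdInsert (rdInsert (rdInsert results_dict "NHBA_peptide" "BAST" "missing/novel allele")
      "NHBA_peptide" "gMATS" "missing/novel allele") "NHBA_peptide" "alleles" "-"
  else
    let gKeys := ["gMATS_NHBA_peptide_covered", "gMATS_NHBA_peptide_uncovered"]
    let bKeys := ["BAST_NHBA_peptide_exact_match", "BAST_NHBA_peptide_cross_reactive", "BAST_NHBA_peptide_none"]
    let gLabels := ["covered", "uncovered", "unpredictable"]
    let bLabels := ["exact_match", "cross-reactive", "none", "insufficient data"]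
    let st := (trGet typing_result "NHBA_peptide").foldl
      (fun (st : List String × Nat × Nat) x =>
        let a := xGet x "allele_id"
        (st.1 ++ [a], updRank scheme_dict gKeys a 0 st.2.1, updRank scheme_dict bKeys a 0 st.2.2))
      ([], 2, 3)
    let rd := rdInsert results_dict "NHBA_peptide" "gMATS" (gLabels.getD st.2.1 "")
    let rd := rdInsert rd "NHBA_peptide" "BAST" (bLabels.getD st.2.2 "")
    rdInsert rd "NHBA_peptide" "alleles" (PySem.Str.join "|" st.1)

-- ===== PRECONDITION & SPEC =====
-- Pre_ excludes exactly the KeyError inputs: when the 'NHBA_peptide' key is present,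
-- every typing dict must carry 'allele_id' and scheme_dict must carry all five scheme keys.
def Pre_process_NHBA (typing_result : List (String × List (List (String × String)))) (results_dict : List (String × String × String)) (scheme_dict : List (String × List String)) : Prop :=
  ((typing_result.map (·.1)).contains "NHBA_peptide" = true) →
    ((∀ x ∈ trGet typing_result "NHBA_peptide", (x.map (·.1)).contains "allele_id" = true) ∧
     (∀ k ∈ ["gMATS_NHBA_peptide_covered", "gMATS_NHBA_peptide_uncovered", "BAST_NHBA_peptide_exact_match",
             "BAST_NHBA_peptide_cross_reactive", "BAST_NHBA_peptide_none"],
        (scheme_dict.map (·.1)).contains k = true))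
instance (typing_result : List (String × List (List (String × String)))) (results_dict : List (String × String × String)) (scheme_dict : List (String × List String)) : Decidable (Pre_process_NHBA typing_result results_dict scheme_dict) := by unfold Pre_process_NHBA; infer_instance

def pvWitness_process_NHBA : (List (String × List (List (String × String)))) × (List (String × String × String)) × (List (String × List String)) :=
  ([("NHBA_peptide", [[("allele_id", "2")]])], [],
   [("gMATS_NHBA_peptide_covered", ["2"]), ("gMATS_NHBA_peptide_uncovered", []),
    ("BAST_NHBA_peptide_exact_match", []), ("BAST_NHBA_peptide_cross_reactive", ["2"]),
    ("BAST_NHBA_peptide_none", [])])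

def Spec_process_NHBA (typing_result : List (String × List (List (String × String)))) (results_dict : List (String × String × String)) (scheme_dict : List (String × List String)) (out : List (String × String × String)) : Prop := out = process_NHBA_alt typing_result results_dict scheme_dict
instance (typing_result : List (String × List (List (String × String)))) (results_dict : List (String × String × String)) (scheme_dict : List (String × List String)) (out : List (String × String × String)) : Decidable (Spec_process_NHBA typing_result results_dict scheme_dict out) := by unfold Spec_process_NHBA; infer_instance

-- ===== CLAIM (what is proved, stated in full; the proofs are below) =====
def Claim_equal_process_NHBA : Prop := ∀ (typing_result : List (String × List (List (String × String)))) (results_dict : List (String × String × String)) (scheme_dict : List (String × List String)), Dom_process_NHBA typing_result results_dict scheme_dict → Pre_process_NHBA typing_result results_dict scheme_dict → Spec_process_NHBA typing_result results_dict scheme_dict (process_NHBA typing_result results_dict scheme_dict)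

-- ===== LEMMAS AND PROOFS =====
theorem indicator_sum_nonneg {α : Type} (l : List α) (p : α → Prop) [DecidablePred p] :
    0 ≤ ((l.map (fun x => if p x then (1:Int) else 0)).sum) := by
  induction l with
  | nil => simp
  | cons a t ih => simp only [List.map_cons, List.sum_cons]; split; omega; omega

theorem indicator_pos_iff {α : Type} (l : List α) (p : α → Prop) [DecidablePred p] :
    (0 < ((l.map (fun x => if p x then (1:Int) else 0)).sum)) ↔ ∃ x ∈ l, p x := by
  induction l with
  | nil => simp
  | cons a t ih =>
    simp only [List.map_cons, List.sum_cons, List.exists_mem_cons_iff, ← ih]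
    have h := indicator_sum_nonneg t p
    by_cases hp : p a <;> simp [hp] <;> omega

-- the fold's first component is the id list, accumulated in order
theorem fold_fst (sd : List (String × List String)) (gK bK : List String)
    (tl : List (List (String × String))) (acc : List String) (g b : Nat) :
    (tl.foldl (fun (st : List String × Nat × Nat) x =>
        (st.1 ++ [xGet x "allele_id"], updRank sd gK (xGet x "allele_id") 0 st.2.1,
         updRank sd bK (xGet x "allele_id") 0 st.2.2)) (acc, g, b)).1
      = acc ++ tl.map (fun x => xGet x "allele_id") := by
  induction tl generalizing acc g b with
  | nil => simp
  | cons h t ih => simp [List.foldl_cons, ih]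

-- the rank components depend only on their own accumulator
theorem fold_g (sd : List (String × List String)) (gK bK : List String)
    (tl : List (List (String × String))) (acc : List String) (g b : Nat) :
    (tl.foldl (fun (st : List String × Nat × Nat) x =>
        (st.1 ++ [xGet x "allele_id"], updRank sd gK (xGet x "allele_id") 0 st.2.1,
         updRank sd bK (xGet x "allele_id") 0 st.2.2)) (acc, g, b)).2.1
      = tl.foldl (fun g x => updRank sd gK (xGet x "allele_id") 0 g) g := by
  induction tl generalizing acc g b with
  | nil => rfl
  | cons h t ih => simp [List.foldl_cons, ih]

theorem fold_b (sd : List (String × List String)) (gK bK : List String)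
    (tl : List (List (String × String))) (acc : List String) (g b : Nat) :
    (tl.foldl (fun (st : List String × Nat × Nat) x =>
        (st.1 ++ [xGet x "allele_id"], updRank sd gK (xGet x "allele_id") 0 st.2.1,
         updRank sd bK (xGet x "allele_id") 0 st.2.2)) (acc, g, b)).2.2
      = tl.foldl (fun b x => updRank sd bK (xGet x "allele_id") 0 b) b := by
  induction tl generalizing acc g b with
  | nil => rfl
  | cons h t ih => simp [List.foldl_cons, ih]

-- pointwise value of the 2-key rank update
theorem updRank2_eq (sd : List (String × List String)) (k0 k1 a : String) (g : Nat) (hg : g ≤ 2) :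
    updRank sd [k0, k1] a 0 g
      = min g (if a ∈ sdGet sd k0 then 0 else if a ∈ sdGet sd k1 then 1 else 2) := by
  by_cases h0 : a ∈ sdGet sd k0 <;> by_cases h1 : a ∈ sdGet sd k1 <;>
    simp [updRank, h0, h1] <;> omega

-- pointwise value of the 3-key rank update
theorem updRank3_eq (sd : List (String × List String)) (k0 k1 k2 a : String) (g : Nat) (hg : g ≤ 3) :
    updRank sd [k0, k1, k2] a 0 g
      = min g (if a ∈ sdGet sd k0 then 0
          else if a ∈ sdGet sd k1 then 1 else if a ∈ sdGet sd k2 then 2 else 3) := by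
  by_cases h0 : a ∈ sdGet sd k0 <;> by_cases h1 : a ∈ sdGet sd k1 <;>
    by_cases h2 : a ∈ sdGet sd k2 <;> simp [updRank, h0, h1, h2] <;> omega

-- characterisation of the gMATS rank fold (2 keys)
theorem gRank_char (sd : List (String × List String)) (k0 k1 : String)
    (tl : List (List (String × String))) (g : Nat) (hg : g ≤ 2) :
    tl.foldl (fun g x => updRank sd [k0, k1] (xGet x "allele_id") 0 g) g
      = min g (if ∃ x ∈ tl, xGet x "allele_id" ∈ sdGet sd k0 then 0
          else if ∃ x ∈ tl, xGet x "allele_id" ∈ sdGet sd k1 then 1 else 2) := by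
  induction tl generalizing g with
  | nil => simp; omega
  | cons h t ih =>
    rw [List.foldl_cons, updRank2_eq sd k0 k1 _ g hg,
      ih _ (by split_ifs <;> omega)]
    simp only [List.exists_mem_cons_iff]
    by_cases h0 : xGet h "allele_id" ∈ sdGet sd k0 <;>
      by_cases h1 : xGet h "allele_id" ∈ sdGet sd k1 <;>
        by_cases t0 : ∃ x ∈ t, xGet x "allele_id" ∈ sdGet sd k0 <;>
          by_cases t1 : ∃ x ∈ t, xGet x "allele_id" ∈ sdGet sd k1 <;>
            simp [h0, h1, t0, t1]

-- characterisation of the BAST rank fold (3 keys)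
theorem bRank_char (sd : List (String × List String)) (k0 k1 k2 : String)
    (tl : List (List (String × String))) (b : Nat) (hb : b ≤ 3) :
    tl.foldl (fun b x => updRank sd [k0, k1, k2] (xGet x "allele_id") 0 b) b
      = min b (if ∃ x ∈ tl, xGet x "allele_id" ∈ sdGet sd k0 then 0
          else if ∃ x ∈ tl, xGet x "allele_id" ∈ sdGet sd k1 then 1
          else if ∃ x ∈ tl, xGet x "allele_id" ∈ sdGet sd k2 then 2 else 3) := by
  induction tl generalizing b with
  | nil => simp; omega
  | cons h t ih =>
    rw [List.foldl_cons, updRank3_eq sd k0 k1 k2 _ b hb,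
      ih _ (by split_ifs <;> omega)]
    simp only [List.exists_mem_cons_iff]
    by_cases h0 : xGet h "allele_id" ∈ sdGet sd k0 <;>
      by_cases h1 : xGet h "allele_id" ∈ sdGet sd k1 <;>
        by_cases h2 : xGet h "allele_id" ∈ sdGet sd k2 <;>
          by_cases t0 : ∃ x ∈ t, xGet x "allele_id" ∈ sdGet sd k0 <;>
            by_cases t1 : ∃ x ∈ t, xGet x "allele_id" ∈ sdGet sd k1 <;>
              by_cases t2 : ∃ x ∈ t, xGet x "allele_id" ∈ sdGet sd k2 <;>
                simp [h0, h1, h2, t0, t1, t2]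

-- ===== VERDICT (by name: the statement is the Claim_ definition above) =====
theorem process_NHBA_spec : Claim_equal_process_NHBA := by
  intro tr rd sd _ _
  unfold Spec_process_NHBA process_NHBA process_NHBA_alt
  by_cases h : ((tr.map (·.1)).contains "NHBA_peptide" = true)
  · rw [if_neg (not_not_intro h), if_neg (not_not_intro h)]
    simp only [fold_fst, fold_g, fold_b, List.nil_append,
      gRank_char sd _ _ _ 2 (by omega), bRank_char sd _ _ _ _ 3 (by omega),
      indicator_pos_iff, List.contains_eq_mem, decide_eq_true_eq]
    by_cases c0 : ∃ x ∈ trGet tr "NHBA_peptide", xGet x "allele_id" ∈ sdGet sd "gMATS_NHBA_peptide_covered" <;>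
      by_cases c1 : ∃ x ∈ trGet tr "NHBA_peptide", xGet x "allele_id" ∈ sdGet sd "gMATS_NHBA_peptide_uncovered" <;>
        by_cases e0 : ∃ x ∈ trGet tr "NHBA_peptide", xGet x "allele_id" ∈ sdGet sd "BAST_NHBA_peptide_exact_match" <;>
          by_cases e1 : ∃ x ∈ trGet tr "NHBA_peptide", xGet x "allele_id" ∈ sdGet sd "BAST_NHBA_peptide_cross_reactive" <;>
            by_cases e2 : ∃ x ∈ trGet tr "NHBA_peptide", xGet x "allele_id" ∈ sdGet sd "BAST_NHBA_peptide_none" <;>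
              simp [c0, c1, e0, e1, e2, List.getD]
  · rw [if_pos h, if_pos h]
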